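-- pv_equiv track=rewrite | github.com/L316645200/LeetCode | LeetCode/每日一题/2023/20230523_1090. 受标签影响的最大值.py | largestValsFromLabels
-- ===== SOURCE A (Python) =====
-- from typing import List
-- from collections import defaultdict
--
-- def largestValsFromLabels(values: List[int], labels: List[int], numWanted: int, useLimit: int) -> int:
--
--     labels_values = sorted(zip(values, labels), reverse=True)
--     cnt = defaultdict(int)
--     i, j = 0, 0
--     res, n = 0, len(values)
--     while i < numWanted and j < n:
--         value, label = labels_values[j]
--         j += 1
--         if cnt[label] >= useLimit:
--             continue
--         res += value
--         cnt[label] += 1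
--         i += 1
--     return res
-- ===== SOURCE B (Python) =====
-- def largestValsFromLabels(values, labels, numWanted, useLimit):
--     groups = {}
--     for v, l in zip(values, labels):
--         groups.setdefault(l, []).append(v)
--     pool = []
--     for vs in groups.values():
--         vs.sort(reverse=True)
--         pool.extend(vs[:max(useLimit, 0)])
--     pool.sort(reverse=True)
--     return sum(pool[:max(numWanted, 0)])
-- ===== Notes on version B (the rewrite author's own statement) =====
-- stated objective: alternative
-- what changed: A does one global descending sort of (value,label) pairs and an interleaved greedy scan with per-label counters and an early stop; B instead groups values by label into a dict, truncates each label's descending-sorted bucket to useLimit, then does a separate global top-numWanted selection over the pooled survivors.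
import Mathlib
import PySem

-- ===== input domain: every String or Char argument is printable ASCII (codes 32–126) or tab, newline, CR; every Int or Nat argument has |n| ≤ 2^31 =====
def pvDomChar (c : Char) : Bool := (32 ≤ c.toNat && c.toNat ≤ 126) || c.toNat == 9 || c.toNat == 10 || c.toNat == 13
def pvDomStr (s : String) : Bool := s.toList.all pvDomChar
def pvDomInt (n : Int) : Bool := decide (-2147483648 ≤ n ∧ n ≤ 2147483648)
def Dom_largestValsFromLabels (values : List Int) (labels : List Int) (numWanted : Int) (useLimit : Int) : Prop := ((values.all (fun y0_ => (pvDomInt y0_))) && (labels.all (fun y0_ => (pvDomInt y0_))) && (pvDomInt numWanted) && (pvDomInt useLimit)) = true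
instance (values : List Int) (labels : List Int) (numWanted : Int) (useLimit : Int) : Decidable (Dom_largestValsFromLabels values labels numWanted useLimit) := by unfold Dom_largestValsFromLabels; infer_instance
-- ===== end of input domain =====

-- B replaces A's single interleaved greedy scan (sort all pairs desc, take while per-label counters allow)
-- by a group-by-label phase (per-label top-useLimit buckets) followed by a separate global top-numWanted
-- selection; objective: alternative decomposition, same asymptotic cost.

-- ===== PORT A =====
-- the while loop: i, j counters, per-label counts in a defaultdict; the list argument is labels_values[j:],
-- so 'j < n' becomes 'the list is nonempty' (exact wherever Python A returns: when labels is shorter than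
-- values and the zipped list runs out with i < numWanted, Python A raises IndexError — excluded by Pre_)
def pvALoop (numWanted useLimit : Int) (lv : List (Int × Int)) (cnt : PySem.Dict Int Int) (i res : Int) : Int :=
  if i < numWanted then
    match lv with
    | [] => res
    | (value, label) :: rest =>
      if useLimit ≤ cnt.getD label 0 then
        pvALoop numWanted useLimit rest cnt i res
      else
        pvALoop numWanted useLimit rest (cnt.insert label (cnt.getD label 0 + 1)) (i + 1) (res + value)
  else res
termination_by lv.length
decreasing_by all_goals simp

def largestValsFromLabels (values : List Int) (labels : List Int) (numWanted : Int) (useLimit : Int) : Int :=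
  let labels_values := PySem.List.sorted2 (values.zip labels) (fun p => p.1) (fun p => p.2) true
  pvALoop numWanted useLimit labels_values PySem.Dict.empty 0 0

-- ===== PORT B =====
def largestValsFromLabels_alt (values : List Int) (labels : List Int) (numWanted : Int) (useLimit : Int) : Int :=
  let groups := (values.zip labels).foldl (fun d p => d.modify p.2 [] (fun g => g ++ [p.1])) PySem.Dict.empty
  let pool := groups.values.foldl
    (fun acc vs => acc ++ (PySem.List.sorted vs (fun x => x) true).take (max useLimit 0).toNat) []
  ((PySem.List.sorted pool (fun x => x) true).take (max numWanted 0).toNat).sum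

-- ===== PRECONDITION & SPEC =====
-- how many items A's greedy can keep in total: per distinct label, its multiplicity capped at useLimit
def pvCapSum (values : List Int) (labels : List Int) (useLimit : Int) : Int :=
  let ls := (values.zip labels).map (fun p => p.2)
  ((PySem.Set.ofList ls).map (fun l => min ((ls.count l : Int)) (max useLimit 0))).sum

-- Pre_ excludes exactly the inputs where A raises IndexError (labels shorter than values and the zipped
-- list is exhausted before numWanted items are kept); A returns on every input satisfying Pre_.
def Pre_largestValsFromLabels (values : List Int) (labels : List Int) (numWanted : Int) (useLimit : Int) : Prop :=
  values.length ≤ labels.length ∨ numWanted ≤ pvCapSum values labels useLimit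
instance (values : List Int) (labels : List Int) (numWanted : Int) (useLimit : Int) : Decidable (Pre_largestValsFromLabels values labels numWanted useLimit) := by unfold Pre_largestValsFromLabels; infer_instance

def pvWitness_largestValsFromLabels : List Int × List Int × Int × Int := ([5, 4, 3, 2, 1], [1, 1, 2, 2, 3], 3, 1)

def Spec_largestValsFromLabels (values : List Int) (labels : List Int) (numWanted : Int) (useLimit : Int) (out : Int) : Prop := out = largestValsFromLabels_alt values labels numWanted useLimit
instance (values : List Int) (labels : List Int) (numWanted : Int) (useLimit : Int) (out : Int) : Decidable (Spec_largestValsFromLabels values labels numWanted useLimit out) := by unfold Spec_largestValsFromLabels; infer_instance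

-- ===== CLAIM (what is proved, stated in full; the proofs are below) =====
def Claim_equal_largestValsFromLabels : Prop := ∀ (values : List Int) (labels : List Int) (numWanted : Int) (useLimit : Int), Dom_largestValsFromLabels values labels numWanted useLimit → Pre_largestValsFromLabels values labels numWanted useLimit → Spec_largestValsFromLabels values labels numWanted useLimit (largestValsFromLabels values labels numWanted useLimit)
-- ===== LEMMAS AND PROOFS =====

-- the subsequence A's greedy keeps: first useLimit occurrences of each label, counters carried along
def pvKeep (u : Int) : List (Int × Int) → PySem.Dict Int Int → List (Int × Int)
  | [], _ => []
  | (v, l) :: rest, cnt =>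
    if u ≤ cnt.getD l 0 then pvKeep u rest cnt
    else (v, l) :: pvKeep u rest (cnt.insert l (cnt.getD l 0 + 1))

-- A's loop sums the first (numWanted - i) kept values
theorem pvALoop_eq (nW u : Int) : ∀ (lv : List (Int × Int)) (cnt : PySem.Dict Int Int) (i res : Int),
    pvALoop nW u lv cnt i res
      = res + ((((pvKeep u lv cnt).map (fun p => p.1)).take (nW - i).toNat).sum) := by
  intro lv
  induction lv with
  | nil => intro cnt i res; rw [pvALoop]; simp [pvKeep]
  | cons hd tl ih =>
    intro cnt i res
    obtain ⟨v, l⟩ := hd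
    rw [pvALoop]
    by_cases hi : i < nW
    · simp only [hi, if_true]
      by_cases hc : u ≤ cnt.getD l 0
      · simp only [hc, if_true, pvKeep]
        rw [ih]
      · simp only [hc, if_false, pvKeep]
        rw [ih]
        have : (nW - i).toNat = (nW - (i + 1)).toNat + 1 := by omega
        rw [this]
        simp [List.take_succ_cons]
        ring
    · simp only [hi, if_false]
      have : (nW - i).toNat = 0 := by omega
      rw [this]
      simp

-- per label, the kept elements are the first (useLimit - current count) occurrences
theorem pvKeep_filter (u : Int) : ∀ (lv : List (Int × Int)) (cnt : PySem.Dict Int Int) (c : Int),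
    (pvKeep u lv cnt).filter (fun p => p.2 == c)
      = (lv.filter (fun p => p.2 == c)).take (u - cnt.getD c 0).toNat := by
  intro lv
  induction lv with
  | nil => intro cnt c; simp [pvKeep]
  | cons hd tl ih =>
    intro cnt c
    obtain ⟨v, l⟩ := hd
    by_cases hlc : l = c
    · subst hlc
      simp only [pvKeep]
      by_cases hc : u ≤ cnt.getD l 0
      · simp only [hc, if_true]
        rw [ih]
        have h0 : (u - cnt.getD l 0).toNat = 0 := by omega
        simp [h0]
      · simp only [hc, if_false]
        simp only [List.filter_cons]
        simp only [BEq.rfl, if_true]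
        rw [ih]
        rw [PySem.Dict.getD_insert_self]
        have : (u - cnt.getD l 0).toNat = (u - (cnt.getD l 0 + 1)).toNat + 1 := by omega
        rw [this]
        simp [List.take_succ_cons]
    · simp only [pvKeep]
      have hne : (l == c) = false := by simp [hlc]
      by_cases hc : u ≤ cnt.getD l 0
      · simp only [hc, if_true]
        rw [ih]
        simp [hne]
      · simp only [hc, if_false]
        simp only [List.filter_cons, hne]
        rw [ih]
        rw [PySem.Dict.getD_insert_of_ne _ _ _ (Ne.symm hlc)]
        simp

theorem pvKeep_sublist (u : Int) : ∀ (lv : List (Int × Int)) (cnt : PySem.Dict Int Int),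
    (pvKeep u lv cnt).Sublist lv := by
  intro lv
  induction lv with
  | nil => intro cnt; simp [pvKeep]
  | cons hd tl ih =>
    intro cnt
    obtain ⟨v, l⟩ := hd
    simp only [pvKeep]
    by_cases hc : u ≤ cnt.getD l 0
    · simp only [hc, if_true]
      exact (ih cnt).trans (List.sublist_cons_self _ _)
    · simp only [hc, if_false]
      exact (ih _).cons₂ _

-- a list is a permutation of its per-label filters, one block per distinct label
theorem pvPartition_perm : ∀ (ks : List Int), ks.Nodup → ∀ (l : List (Int × Int)),
    (∀ p ∈ l, p.2 ∈ ks) → (ks.flatMap (fun k => l.filter (fun p => p.2 == k))).Perm l := by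
  intro ks
  induction ks with
  | nil =>
    intro _ l hl
    simp only [List.flatMap_nil]
    cases l with
    | nil => exact List.Perm.refl _
    | cons hd tl => exact absurd (hl hd (by simp)) (by simp)
  | cons k ks ih =>
    intro hnd l hl
    simp only [List.flatMap_cons]
    have hks : ks.Nodup := (List.nodup_cons.mp hnd).2
    have hkn : k ∉ ks := (List.nodup_cons.mp hnd).1
    have hrw : ks.flatMap (fun k' => l.filter (fun p => p.2 == k'))
        = ks.flatMap (fun k' => (l.filter (fun p => !(p.2 == k))).filter (fun p => p.2 == k')) := by
      apply List.flatMap_congr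
      intro k' hk'
      rw [List.filter_filter]
      apply List.filter_congr
      intro p _
      have hkk' : k' ≠ k := fun e => hkn (e ▸ hk')
      by_cases h : p.2 = k'
      · simp [h, hkk']
      · simp [h]
    rw [hrw]
    have hih := ih hks (l.filter (fun p => !(p.2 == k))) (by
      intro p hp
      rw [List.mem_filter] at hp
      have := hl p hp.1
      simp only [List.mem_cons] at this
      rcases this with h | h
      · exfalso; revert hp; simp [h]
      · exact h)
    exact (List.Perm.append_left _ hih).trans (List.filter_append_perm _ l)

-- Python's reverse tuple sort is PySem's reverse sort under the lexicographic key
theorem pvSorted2_eq_sorted_lex (xs : List (Int × Int)) :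
    PySem.List.sorted2 xs (fun p => p.1) (fun p => p.2) true
      = PySem.List.sorted xs (fun p => toLex p) true := by
  rw [PySem.List.sorted_rev_eq_foldl_insertBy]
  unfold PySem.List.sorted2
  have hfun : (fun (a b : Int × Int) => decide (b.1 < a.1) || (!decide (a.1 < b.1) && decide (b.2 < a.2)))
      = (fun (a b : Int × Int) => decide (toLex b < toLex a)) := by
    funext a b
    rcases a with ⟨a1, a2⟩; rcases b with ⟨b1, b2⟩
    have h2 : (toLex ((b1, b2) : Int × Int) < toLex ((a1, a2) : Int × Int))
        ↔ (b1 < a1 ∨ (¬ a1 < b1 ∧ b2 < a2)) := by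
      simp only [Prod.Lex.lt_iff, ofLex_toLex]
      omega
    simp only [h2]
    by_cases hA : b1 < a1 <;> by_cases hB : a1 < b1 <;> by_cases hC : b2 < a2 <;>
      simp [hA, hB, hC]
  show List.foldl (fun acc x => PySem.List.insertBy
      (fun a b => decide (b.1 < a.1) || (!decide (a.1 < b.1) && decide (b.2 < a.2))) x acc) [] xs
    = List.foldl (fun acc x => PySem.List.insertBy (fun a b => decide (toLex b < toLex a)) x acc) [] xs
  rw [hfun]

theorem pvMain (values labels : List Int) (nW u : Int) :
    largestValsFromLabels values labels nW u = largestValsFromLabels_alt values labels nW u := by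
  unfold largestValsFromLabels largestValsFromLabels_alt
  rw [pvSorted2_eq_sorted_lex, pvALoop_eq]
  set ZL := values.zip labels with hZL
  set L := PySem.List.sorted ZL (fun p => toLex p) true with hL
  set F := pvKeep u L PySem.Dict.empty with hF
  set groups := ZL.foldl (fun d p => d.modify p.2 [] (fun g => g ++ [p.1])) PySem.Dict.empty with hgroups
  set ls := ZL.map (fun p => p.2) with hls
  -- facts about the grouping dict
  have hkeys : groups.keys = PySem.Set.ofList ls := by
    have h := PySem.Dict.keys_foldl_modify_key ZL (fun p => p.2) []
        (fun _ p => (fun g => g ++ [p.1])) PySem.Dict.empty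
    simpa using h
  have hnodup : groups.keys.Nodup := by
    have h := PySem.Dict.nodup_keys_foldl_modify_key ZL (fun p => p.2) []
        (fun _ p => (fun g => g ++ [p.1])) PySem.Dict.empty (by simp [PySem.Dict.keys_empty])
    simpa using h
  have hgetD : ∀ c : Int, groups.getD c [] = (ZL.filter (fun p => p.2 == c)).map (fun p => p.1) := by
    intro c
    have hsw : groups
        = (ZL.map Prod.swap).foldl (fun d q => d.modify q.1 [] (fun g => g ++ [q.2])) PySem.Dict.empty := by
      rw [List.foldl_map]
      rfl
    rw [hsw, PySem.Dict.getD_foldl_modify_append]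
    simp only [PySem.Dict.getD_empty, List.nil_append, List.filter_map, List.map_map,
      Function.comp_def, Prod.fst_swap, Prod.snd_swap]
  have hvalues : groups.values
      = (PySem.Set.ofList ls).map (fun k => (ZL.filter (fun p => p.2 == k)).map (fun p => p.1)) := by
    show groups.items.map (fun p => p.2) = _
    rw [PySem.Dict.items_eq_map_keys groups hnodup []]
    rw [List.map_map, hkeys]
    apply List.map_congr_left
    intro k _
    simp only [Function.comp_def]
    exact hgetD k
  -- order facts about L
  have hLpair : L.Pairwise (fun p q : Int × Int => q.1 ≤ p.1) := by
    have h := PySem.List.sorted_pairwise_rev (κ := Int ×ₗ Int) ZL (fun p => toLex p)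
    rw [← hL] at h
    refine h.imp ?_
    intro a b hab
    rcases a with ⟨a1, a2⟩; rcases b with ⟨b1, b2⟩
    rw [Prod.Lex.le_iff] at hab
    simp only [ofLex_toLex] at hab
    omega
  have hLperm : L.Perm ZL := PySem.List.sorted_perm ZL (fun p => toLex p) true
  -- per label: B's sorted bucket is the label's fiber of L
  have hbucket : ∀ k : Int,
      PySem.List.sorted ((ZL.filter (fun p => p.2 == k)).map (fun p => p.1)) (fun x => x) true
        = (L.filter (fun p => p.2 == k)).map (fun p => p.1) := by
    intro k
    apply List.Perm.eq_of_pairwise (le := fun a b : Int => b ≤ a)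
    · intro a b _ _ h1 h2; omega
    · exact PySem.List.sorted_pairwise_rev _ (fun x => x)
    · exact List.pairwise_map.mpr (hLpair.sublist List.filter_sublist)
    · exact (PySem.List.sorted_perm _ _ _).trans
        (((hLperm.filter _).map _).symm)
  -- the two truncation counts agree
  have hU : ∀ c : Int, (max u 0).toNat = (u - PySem.Dict.empty.getD c (0 : Int)).toNat := by
    intro c
    rw [PySem.Dict.getD_empty]
    omega
  -- B's pool is (a permutation of) the fst-projection of F
  have hpool : groups.values.foldl
      (fun acc vs => acc ++ (PySem.List.sorted vs (fun x => x) true).take (max u 0).toNat) []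
      = ((PySem.Set.ofList ls).flatMap (fun k => F.filter (fun p => p.2 == k))).map (fun p => p.1) := by
    rw [PySem.List.foldl_append_eq_flatMap, List.nil_append, hvalues, List.flatMap_map]
    rw [List.map_flatMap]
    apply List.flatMap_congr
    intro k _
    rw [hbucket k, ← List.map_take]
    congr 1
    rw [hF, pvKeep_filter u L PySem.Dict.empty k, hU k]
  have hFmem : ∀ p ∈ F, p.2 ∈ PySem.Set.ofList ls := by
    intro p hp
    have h1 : p ∈ L := (pvKeep_sublist u L PySem.Dict.empty).subset hp
    have h2 : p ∈ ZL := hLperm.subset h1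
    rw [PySem.Set.mem_ofList]
    exact List.mem_map_of_mem h2
  have hFperm : (((PySem.Set.ofList ls).flatMap (fun k => F.filter (fun p => p.2 == k))).map (fun p => p.1)).Perm
      (F.map (fun p => p.1)) :=
    (pvPartition_perm (PySem.Set.ofList ls) (PySem.Set.nodup_ofList ls) F hFmem).map _
  -- the final sorted pool IS the fst-projection of F
  have hfinal : PySem.List.sorted
      (groups.values.foldl
        (fun acc vs => acc ++ (PySem.List.sorted vs (fun x => x) true).take (max u 0).toNat) [])
      (fun x => x) true = F.map (fun p => p.1) := by
    apply List.Perm.eq_of_pairwise (le := fun a b : Int => b ≤ a)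
    · intro a b _ _ h1 h2; omega
    · exact PySem.List.sorted_pairwise_rev _ (fun x => x)
    · exact List.pairwise_map.mpr (hLpair.sublist (pvKeep_sublist u L PySem.Dict.empty))
    · exact (PySem.List.sorted_perm _ _ _).trans (hpool ▸ hFperm)
  show 0 + (List.take (nW - 0).toNat (List.map (fun p => p.1) F)).sum
      = (List.take (max nW 0).toNat (PySem.List.sorted
          (groups.values.foldl
            (fun acc vs => acc ++ (PySem.List.sorted vs (fun x => x) true).take (max u 0).toNat) [])
          (fun x => x) true)).sum
  rw [hfinal]
  have hnw : (nW - 0).toNat = (max nW 0).toNat := by omega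
  rw [hnw]
  ring

-- ===== VERDICT (by name: the statement is the Claim_ definition above) =====
theorem largestValsFromLabels_spec : Claim_equal_largestValsFromLabels := by
  intro values labels numWanted useLimit _ _
  unfold Spec_largestValsFromLabels
  exact pvMain values labels numWanted useLimit
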